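-- pv_equiv track=rewrite | github.com/ericthewry/autoplay | script_to_csv.py | aggregate_backwards
-- ===== SOURCE A (Python) =====
-- def aggregate_backwards(strings, start_index, num_words):
--     aggregation = []
--     idx = start_index
--     while len(aggregation) < num_words and idx >= 0:
--         curr_string_words = strings[idx].split()
--         if len(curr_string_words) <= 0:
--             idx -= 1
--             continue
--
--         if curr_string_words[0][0] == ">":
--             curr_string_words[-1] += "<"
--
--         words_needed = num_words - len(aggregation)
--         if len(curr_string_words) < words_needed:
--             aggregation = curr_string_words + aggregation
--             idx -= 1
--         else:
--             # get as many words as is needed and break loop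
--             aggregation = curr_string_words[-words_needed:] + aggregation
--
--
--     assert len(aggregation) <= num_words
--     return " ".join(aggregation)
-- ===== SOURCE B (Python) =====
-- def aggregate_backwards(strings, start_index, num_words):
--     # Word-level backward collection: gather words newest-last-first into a
--     # reversed accumulator, then reverse and join once at the end.
--     collected = []  # words in reverse order
--     idx = start_index
--     while len(collected) < num_words and idx >= 0:
--         words = strings[idx].split()
--         if words:
--             if words[0].startswith(">"):
--                 words[-1] += "<"
--             for w in reversed(words):
--                 if len(collected) >= num_words:
--                     break
--                 collected.append(w)
--         idx -= 1
--     return " ".join(reversed(collected))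
-- ===== Notes on version B (the rewrite author's own statement) =====
-- stated objective: simpler
-- what changed: Replaces A's two-way branch (prepend the whole word list vs. prepend a negative slice and stop) with a uniform word-by-word backward collection into a reversed accumulator that is reversed and joined once at the end.
import Mathlib
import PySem

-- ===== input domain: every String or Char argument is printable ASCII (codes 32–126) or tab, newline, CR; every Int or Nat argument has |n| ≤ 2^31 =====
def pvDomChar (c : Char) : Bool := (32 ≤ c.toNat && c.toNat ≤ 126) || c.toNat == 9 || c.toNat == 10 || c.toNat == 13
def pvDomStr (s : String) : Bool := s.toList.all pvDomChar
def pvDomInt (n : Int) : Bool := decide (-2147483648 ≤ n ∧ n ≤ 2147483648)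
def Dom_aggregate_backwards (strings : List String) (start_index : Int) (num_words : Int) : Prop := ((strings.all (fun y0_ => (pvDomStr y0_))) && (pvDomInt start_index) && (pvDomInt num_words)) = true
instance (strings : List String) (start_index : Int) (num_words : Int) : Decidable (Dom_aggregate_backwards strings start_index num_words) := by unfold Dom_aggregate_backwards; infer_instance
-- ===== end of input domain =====

-- B replaces A's two-way branch (prepend whole word list / prepend a negative slice and stop)
-- by a uniform word-by-word backward collection into a reversed accumulator, reversed and
-- joined once at the end (objective: simpler).

-- ===== PORT A =====
-- shared port of the Python statement `curr_string_words[-1] += "<"`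
def pvBumpLast (ws : List (List Char)) : List (List Char) :=
  ws.dropLast ++ [ws.getLastD [] ++ ['<']]

-- the while-loop of A; word lists are kept as List (List Char) (strings on the list side)
def pvLoopA (strings : List String) (num_words : Int) : Int → List (List Char) → List (List Char)
  | idx, aggregation =>
    if (aggregation.length : Int) < num_words ∧ 0 ≤ idx then
      match PySem.List.pyGet? strings idx with
      | none => aggregation  -- strings[idx] raises IndexError in Python; Pre_ excludes this
      | some s =>
        let curr := PySem.Chars.split₀ s.toList
        if curr.length ≤ 0 then
          pvLoopA strings num_words (idx - 1) aggregation
        else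
          -- curr[0][0] == ">" (split words are nonempty, so pyGet? is exact here)
          let curr := if PySem.List.pyGet? (curr.headD []) 0 == some '>' then pvBumpLast curr else curr
          let words_needed := num_words - (aggregation.length : Int)
          if (curr.length : Int) < words_needed then
            pvLoopA strings num_words (idx - 1) (curr ++ aggregation)
          else
            PySem.List.slice curr (some (-words_needed)) none ++ aggregation
    else aggregation
  termination_by idx _ => (idx + 1).toNat
  decreasing_by all_goals omega

def aggregate_backwards (strings : List String) (start_index : Int) (num_words : Int) : String :=
  String.ofList (PySem.Chars.join [' '] (pvLoopA strings num_words start_index []))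

-- ===== PORT B =====
-- B's loop: collect words newest-first into `collected` (reverse order), one word at a time
def pvLoopB (strings : List String) (num_words : Int) : Int → List (List Char) → List (List Char)
  | idx, collected =>
    if (collected.length : Int) < num_words ∧ 0 ≤ idx then
      match PySem.List.pyGet? strings idx with
      | none => collected  -- strings[idx] raises IndexError in Python; Pre_ excludes this
      | some s =>
        let words := PySem.Chars.split₀ s.toList
        let collected' :=
          if words.isEmpty then collected
          else
            let words := if PySem.Chars.startswith (words.headD []) ['>'] then pvBumpLast words else words
            -- for w in reversed(words): if len(collected) >= num_words: break; collected.append(w)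
            words.reverse.foldl
              (fun acc w => if num_words ≤ (acc.length : Int) then acc else acc ++ [w]) collected
        pvLoopB strings num_words (idx - 1) collected'
    else collected
  termination_by idx _ => (idx + 1).toNat
  decreasing_by omega

def aggregate_backwards_alt (strings : List String) (start_index : Int) (num_words : Int) : String :=
  String.ofList (PySem.Chars.join [' '] (pvLoopB strings num_words start_index []).reverse)

-- ===== PRECONDITION & SPEC =====
-- Pre_ excludes exactly the inputs where the Python A raises: num_words < 0 (the final
-- assert fails) and num_words > 0 with start_index ≥ len(strings) (IndexError).
def Pre_aggregate_backwards (strings : List String) (start_index : Int) (num_words : Int) : Prop :=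
  0 ≤ num_words ∧ (num_words = 0 ∨ start_index < (strings.length : Int))
instance (strings : List String) (start_index : Int) (num_words : Int) : Decidable (Pre_aggregate_backwards strings start_index num_words) := by unfold Pre_aggregate_backwards; infer_instance
def pvWitness_aggregate_backwards : List String × Int × Int := ([">a b", "c d"], 1, 3)

def Spec_aggregate_backwards (strings : List String) (start_index : Int) (num_words : Int) (out : String) : Prop := out = aggregate_backwards_alt strings start_index num_words
instance (strings : List String) (start_index : Int) (num_words : Int) (out : String) : Decidable (Spec_aggregate_backwards strings start_index num_words out) := by unfold Spec_aggregate_backwards; infer_instance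

-- ===== CLAIM (what is proved, stated in full; the proofs are below) =====
def Claim_equal_aggregate_backwards : Prop := ∀ (strings : List String) (start_index : Int) (num_words : Int), Dom_aggregate_backwards strings start_index num_words → Pre_aggregate_backwards strings start_index num_words → Spec_aggregate_backwards strings start_index num_words (aggregate_backwards strings start_index num_words)

-- ===== LEMMAS AND PROOFS =====

-- B's guarded append-fold takes exactly the first (num_words - |acc|) elements
lemma pv_foldl_guard (nw : Int) (l : List (List Char)) (acc : List (List Char)) :
    l.foldl (fun acc w => if nw ≤ (acc.length : Int) then acc else acc ++ [w]) acc
      = acc ++ l.take (nw - acc.length).toNat := by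
  induction l generalizing acc with
  | nil => simp
  | cons w l ih =>
    simp only [List.foldl_cons]
    by_cases h : nw ≤ (acc.length : Int)
    · rw [if_pos h, ih]
      have h0 : (nw - acc.length).toNat = 0 := by omega
      simp [h0]
    · rw [if_neg h, ih]
      have h1 : (nw - ((acc ++ [w]).length : Int)).toNat = (nw - acc.length).toNat - 1 := by
        simp; omega
      have h2 : (nw - acc.length).toNat = ((nw - acc.length).toNat - 1) + 1 := by omega
      rw [h1, h2, List.take_succ_cons, List.append_assoc, List.singleton_append,
        Nat.add_sub_cancel]

-- A's ">"-test and B's startswith agree on every word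
lemma pv_gt_test (w : List Char) :
    (PySem.List.pyGet? w 0 == some '>') = PySem.Chars.startswith w ['>'] := by
  cases hs : PySem.Chars.startswith w ['>'] with
  | true =>
    obtain ⟨t, ht⟩ := (PySem.Chars.startswith_iff w ['>']).mp hs
    simp [← ht, PySem.List.pyGet?_zero_cons]
  | false =>
    cases w with
    | nil => simp [PySem.List.pyGet?]
    | cons c cs =>
      have hpre : ¬ (['>'] <+: c :: cs) := by
        intro h
        rw [(PySem.Chars.startswith_iff _ _).mpr h] at hs
        cases hs
      have hc : c ≠ '>' := by
        intro h
        exact hpre ⟨cs, by simp [h]⟩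
      simp [PySem.List.pyGet?_zero_cons, hc]

-- the two loops compute reverses of each other
lemma pv_loop_eq (strings : List String) (nw : Int) :
    ∀ (n : Nat) (idx : Int), (idx + 1).toNat ≤ n →
      ∀ agg : List (List Char),
        pvLoopB strings nw idx agg.reverse = (pvLoopA strings nw idx agg).reverse := by
  intro n
  induction n with
  | zero =>
    intro idx hn agg
    have hneg : ¬ (0 ≤ idx) := by omega
    rw [pvLoopA, pvLoopB]
    rw [if_neg (by simp [hneg]), if_neg (by simp [hneg])]
  | succ n ih =>
    intro idx hn agg
    rw [pvLoopA, pvLoopB]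
    by_cases hc : ((agg.length : Int) < nw ∧ 0 ≤ idx)
    · rw [if_pos (by simpa using hc), if_pos hc]
      cases hg : PySem.List.pyGet? strings idx with
      | none => rfl
      | some s =>
        simp only []
        by_cases he : (PySem.Chars.split₀ s.toList).length ≤ 0
        · have hnil : PySem.Chars.split₀ s.toList = [] := by
            cases h : PySem.Chars.split₀ s.toList with
            | nil => rfl
            | cons a l => rw [h] at he; simp at he
          rw [if_pos he]
          simp only [hnil, List.isEmpty_nil, if_true]
          exact ih (idx - 1) (by omega) agg
        · rw [if_neg he]
          have hne : (PySem.Chars.split₀ s.toList).isEmpty = false := by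
            cases h : PySem.Chars.split₀ s.toList with
            | nil => rw [h] at he; simp at he
            | cons a l => simp [h]
          rw [hne]
          simp only [Bool.false_eq_true, if_false, pv_gt_test]
          set tw := if PySem.Chars.startswith ((PySem.Chars.split₀ s.toList).headD []) ['>']
                    then pvBumpLast (PySem.Chars.split₀ s.toList)
                    else PySem.Chars.split₀ s.toList with htw
          rw [pv_foldl_guard]
          have hlen : ((agg.reverse.length : Int)) = (agg.length : Int) := by simp
          by_cases hlt : (tw.length : Int) < nw - (agg.length : Int)
          · rw [if_pos (by simpa [hlen] using hlt)]
            have htake : tw.reverse.take (nw - agg.reverse.length).toNat = tw.reverse := by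
              apply List.take_of_length_le
              simp; omega
            rw [htake, ← List.reverse_append]
            exact ih (idx - 1) (by omega) (tw ++ agg)
          · rw [if_neg (by simpa [hlen] using hlt)]
            -- A stops here with exactly num_words words; B's next guard check stops too
            have hk : 0 < nw - (agg.length : Int) := by omega
            set k : Nat := (nw - (agg.length : Int)).toNat with hkdef
            have hkl : k ≤ tw.length := by omega
            have hslice : PySem.List.slice tw (some (-(nw - (agg.length : Int)))) none
                = tw.drop (tw.length - k) := by
              have : (nw - (agg.length : Int)) = ((k : Nat) : Int) := by omega
              rw [this, PySem.List.slice_from_neg_natCast _ _ (by omega)]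
            rw [hslice]
            have htake2 : (nw - (agg.reverse.length : Int)).toNat = k := by simp [hkdef]
            rw [htake2]
            have hrev : tw.reverse.take k = (tw.drop (tw.length - k)).reverse := by
              rw [List.reverse_drop]
              congr 1
              omega
            rw [hrev, ← List.reverse_append]
            -- B's recursive call returns immediately: the accumulator is full
            rw [pvLoopB]
            rw [if_neg]
            simp
            omega
    · rw [if_neg (by simpa using hc), if_neg hc]

-- ===== VERDICT (by name: the statement is the Claim_ definition above) =====
theorem aggregate_backwards_spec : Claim_equal_aggregate_backwards := by
  intro strings start_index num_words _ _
  unfold Spec_aggregate_backwards aggregate_backwards aggregate_backwards_alt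
  have h := pv_loop_eq strings num_words (start_index + 1).toNat start_index le_rfl []
  simp only [List.reverse_nil] at h
  rw [h, List.reverse_reverse]
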